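-- pv_equiv track=rewrite | github.com/Giladvz/DataManagementOnline | main.py | retrive_from_lst_by_str
-- ===== SOURCE A (Python) =====
-- def retrive_from_lst_by_str(lst,i,st):
--     ret = ""
--     while(lst[i] != st):
--         if(ret != ""):
--             ret += "_"
--         ret += lst[i]
--         i += 1
--     return ret
-- ===== SOURCE B (Python) =====
-- def retrive_from_lst_by_str(lst, i, st):
--     j = i
--     while lst[j] != st:
--         j += 1
--     return "_".join(lst[i:j])
-- ===== Notes on version B (the rewrite author's own statement) =====
-- stated objective: simpler
-- what changed: A builds the result string inside the scan with an accumulator and a manual `if ret != ""` separator guard; B only scans for the terminator's index j and then returns "_".join(lst[i:j]) in one slice-and-join step.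
-- intended difference: On inputs whose scanned run starts with an empty string (and is not just the single empty string), A's `if ret != ""` guard silently drops the separator slots of the leading empty elements (A returns 'a' for (['', 'a', 'x'], 0, 'x')) while B returns the plain underscore-join '_a', the intended join of the elements before the terminator. — e.g. on retrive_from_lst_by_str(["", "a", "x"], 0, "x"): A returns "a", B returns "_a"
-- outside the precondition, e.g. on retrive_from_lst_by_str(['x', 'a'], -1, 'x'): A returns 'a', B returns ''
import Mathlib
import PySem

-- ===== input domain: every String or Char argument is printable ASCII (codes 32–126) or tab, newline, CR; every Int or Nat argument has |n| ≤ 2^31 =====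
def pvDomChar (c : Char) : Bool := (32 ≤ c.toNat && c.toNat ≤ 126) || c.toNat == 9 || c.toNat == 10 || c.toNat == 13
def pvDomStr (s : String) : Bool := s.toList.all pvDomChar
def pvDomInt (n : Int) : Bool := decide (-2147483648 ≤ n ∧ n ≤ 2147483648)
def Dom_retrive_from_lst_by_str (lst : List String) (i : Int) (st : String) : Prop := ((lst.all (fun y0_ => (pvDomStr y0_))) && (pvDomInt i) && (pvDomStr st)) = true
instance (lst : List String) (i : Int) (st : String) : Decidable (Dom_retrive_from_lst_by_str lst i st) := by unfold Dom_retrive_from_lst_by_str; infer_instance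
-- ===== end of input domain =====

-- B replaces A's interleaved build-while-scanning loop (string accumulator with a manual
-- separator guard) by a scan that only finds the terminator index, then one slice and one
-- "_".join; objective: simpler.

-- ===== PORT A =====
-- one iteration's update of ret: `if ret != "": ret += "_"` then `ret += lst[i]`
def pvStep (ret x : String) : String := (if ret ≠ "" then ret ++ "_" else ret) ++ x

-- the while loop; fuel only makes the recursion structural (inside Pre_ the loop runs
-- at most lst.length iterations, so fuel lst.length + 1 is never exhausted there)
def pvLoopA (lst : List String) (st : String) (fuel : Nat) (i : Int) (ret : String) : String :=
  match fuel with
  | 0 => ret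
  | Nat.succ f =>
    match PySem.List.pyGet? lst i with
    | none => ret   -- IndexError: excluded by Pre_
    | some x => if x ≠ st then pvLoopA lst st f (i + 1) (pvStep ret x) else ret

def retrive_from_lst_by_str (lst : List String) (i : Int) (st : String) : String :=
  pvLoopA lst st (lst.length + 1) i ""

-- ===== PORT B =====
-- `j = i; while lst[j] != st: j += 1` — returns the final j (none = IndexError, excluded by Pre_)
def pvFindTerm (lst : List String) (st : String) (fuel : Nat) (j : Int) : Option Int :=
  match fuel with
  | 0 => none
  | Nat.succ f =>
    match PySem.List.pyGet? lst j with
    | none => none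
    | some x => if x ≠ st then pvFindTerm lst st f (j + 1) else some j

def retrive_from_lst_by_str_alt (lst : List String) (i : Int) (st : String) : String :=
  match pvFindTerm lst st (lst.length + 1) i with
  | none => ""   -- IndexError: excluded by Pre_
  | some j => PySem.Str.join "_" (PySem.List.slice lst (some i) (some j))

-- ===== PRECONDITION & SPEC =====
-- Pre_ excludes (a) inputs where A raises IndexError (the scan runs off the list before
-- hitting the terminator), and (b) negative start indices whose scan wraps past the end
-- back to the list head (Python negative-index wraparound restarting at index 0 — an
-- accidental corner on which A still returns a value but no caller could rely on it;
-- B returns a different slice there).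
def Pre_retrive_from_lst_by_str (lst : List String) (i : Int) (st : String) : Prop :=
  (0 ≤ i ∧ st ∈ lst.drop i.toNat) ∨
  (i < 0 ∧ 0 ≤ i + lst.length ∧ st ∈ lst.drop (i + lst.length).toNat)
instance (lst : List String) (i : Int) (st : String) : Decidable (Pre_retrive_from_lst_by_str lst i st) := by unfold Pre_retrive_from_lst_by_str; infer_instance

def pvWitness_retrive_from_lst_by_str : List String × Int × String := (["a", "b", "x"], 0, "x")

-- the (Python-resolved) start position of the scan
def pvStart (lst : List String) (i : Int) : Nat := if 0 ≤ i then i.toNat else (i + lst.length).toNat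

-- On inputs whose scan starts at an empty string not immediately followed by the
-- terminator, A's `if ret != ""` guard drops the separator slots of the leading empty
-- elements and returns e.g. "a" for (["", "a", "x"], 0, "x"), while B returns the plain
-- underscore-join "_a" — the intended join of the elements before the terminator.
def D_retrive_from_lst_by_str (lst : List String) (i : Int) (st : String) : Prop :=
  st ≠ "" ∧ lst[pvStart lst i]? = some "" ∧ lst[pvStart lst i + 1]? ≠ some st
instance (lst : List String) (i : Int) (st : String) : Decidable (D_retrive_from_lst_by_str lst i st) := by unfold D_retrive_from_lst_by_str; infer_instance

def Spec_retrive_from_lst_by_str (lst : List String) (i : Int) (st : String) (out : String) : Prop := ¬ D_retrive_from_lst_by_str lst i st → out = retrive_from_lst_by_str_alt lst i st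
instance (lst : List String) (i : Int) (st : String) (out : String) : Decidable (Spec_retrive_from_lst_by_str lst i st out) := by unfold Spec_retrive_from_lst_by_str; infer_instance

def pvDiffWitness_retrive_from_lst_by_str : List String × Int × String := (["", "a", "x"], 0, "x")
def pvDiffWitnessOut_retrive_from_lst_by_str : String × String := ("a", "_a")

-- ===== CLAIM (what is proved, stated in full; the proofs are below) =====
def Claim_unchanged_retrive_from_lst_by_str : Prop := ∀ (lst : List String) (i : Int) (st : String), Dom_retrive_from_lst_by_str lst i st → Pre_retrive_from_lst_by_str lst i st → Spec_retrive_from_lst_by_str lst i st (retrive_from_lst_by_str lst i st)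
def Claim_changed_retrive_from_lst_by_str : Prop := Dom_retrive_from_lst_by_str (pvDiffWitness_retrive_from_lst_by_str.1) (pvDiffWitness_retrive_from_lst_by_str.2.1) (pvDiffWitness_retrive_from_lst_by_str.2.2) ∧ Pre_retrive_from_lst_by_str (pvDiffWitness_retrive_from_lst_by_str.1) (pvDiffWitness_retrive_from_lst_by_str.2.1) (pvDiffWitness_retrive_from_lst_by_str.2.2) ∧ D_retrive_from_lst_by_str (pvDiffWitness_retrive_from_lst_by_str.1) (pvDiffWitness_retrive_from_lst_by_str.2.1) (pvDiffWitness_retrive_from_lst_by_str.2.2) ∧ retrive_from_lst_by_str (pvDiffWitness_retrive_from_lst_by_str.1) (pvDiffWitness_retrive_from_lst_by_str.2.1) (pvDiffWitness_retrive_from_lst_by_str.2.2) = pvDiffWitnessOut_retrive_from_lst_by_str.1 ∧ retrive_from_lst_by_str_alt (pvDiffWitness_retrive_from_lst_by_str.1) (pvDiffWitness_retrive_from_lst_by_str.2.1) (pvDiffWitness_retrive_from_lst_by_str.2.2) = pvDiffWitnessOut_retrive_from_lst_by_str.2 ∧ pvDiffWitnessOut_retrive_from_lst_by_str.1 ≠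 pvDiffWitnessOut_retrive_from_lst_by_str.2
def Claim_exact_retrive_from_lst_by_str : Prop := ∀ (lst : List String) (i : Int) (st : String), Dom_retrive_from_lst_by_str lst i st → Pre_retrive_from_lst_by_str lst i st → D_retrive_from_lst_by_str lst i st → retrive_from_lst_by_str lst i st ≠ retrive_from_lst_by_str_alt lst i st

-- ===== LEMMAS AND PROOFS =====

-- the elements the scan passes before the terminator
def pvParts (lst : List String) (i : Int) (st : String) : List String :=
  (lst.drop (pvStart lst i)).takeWhile (fun x => x != st)

-- lst[i] = lst[s] when i resolves (Python-style) to the in-range position s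
theorem pvGet_at (lst : List String) (s : Nat) (i : Int)
    (hidx : (0 ≤ i ∧ i = (s : Int)) ∨ (i < 0 ∧ i + lst.length = (s : Int)))
    (hs : s < lst.length) :
    PySem.List.pyGet? lst i = some lst[s] := by
  rcases hidx with ⟨hi, rfl⟩ | ⟨hi, heq⟩
  · rw [PySem.List.pyGet?_natCast, List.getElem?_eq_getElem hs]
  · have hk : i = -(((lst.length - s : Nat) : Int)) := by omega
    rw [hk, PySem.List.pyGet?_neg_natCast lst (lst.length - s) (by omega) (by omega)]
    have h : lst.length - (lst.length - s) = s := by omega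
    rw [h, List.getElem?_eq_getElem hs]

-- A's loop, started anywhere in Pre_, folds pvStep over the scanned run
theorem pvLoopA_eq (lst : List String) (st : String) :
    ∀ (fuel s : Nat) (i : Int) (ret : String),
      ((0 ≤ i ∧ i = (s : Int)) ∨ (i < 0 ∧ i + lst.length = (s : Int))) →
      st ∈ lst.drop s →
      lst.length - s < fuel →
      pvLoopA lst st fuel i ret = ((lst.drop s).takeWhile (fun x => x != st)).foldl pvStep ret := by
  intro fuel
  induction fuel with
  | zero => intro s i ret _ hmem hf; omega
  | succ f ih =>
    intro s i ret hidx hmem hf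
    have hs : s < lst.length := by
      by_contra h
      rw [List.drop_eq_nil_of_le (by omega)] at hmem
      simp at hmem
    have hget := pvGet_at lst s i hidx hs
    have hdrop := List.drop_eq_getElem_cons hs
    by_cases hx : lst[s] = st
    · rw [pvLoopA, hget]
      simp only [hx, ne_eq, not_true_eq_false, if_false, hdrop]
      simp
    · have hmem' : st ∈ lst.drop (s + 1) := by
        rcases List.mem_cons.mp (hdrop ▸ hmem) with h | h
        · exact absurd h.symm hx
        · exact h
      have hs1 : s + 1 < lst.length := by
        by_contra h
        rw [List.drop_eq_nil_of_le (by omega)] at hmem'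
        simp at hmem'
      have hidx' : ((0 ≤ i + 1 ∧ i + 1 = ((s+1 : Nat) : Int)) ∨ (i + 1 < 0 ∧ (i + 1) + lst.length = ((s+1 : Nat) : Int))) := by
        rcases hidx with ⟨hi, heq⟩ | ⟨hi, heq⟩
        · left; constructor <;> [omega; (push_cast; omega)]
        · right; push_cast; omega
      rw [pvLoopA, hget]
      simp only [ne_eq, hx, not_false_eq_true, if_true]
      rw [ih (s+1) (i+1) (pvStep ret lst[s]) hidx' hmem' (by omega)]
      conv_rhs => rw [hdrop, List.takeWhile_cons]
      simp [hx]

-- B's scan returns i + (length of the scanned run)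
theorem pvFindTerm_eq (lst : List String) (st : String) :
    ∀ (fuel s : Nat) (i : Int),
      ((0 ≤ i ∧ i = (s : Int)) ∨ (i < 0 ∧ i + lst.length = (s : Int))) →
      st ∈ lst.drop s →
      lst.length - s < fuel →
      pvFindTerm lst st fuel i = some (i + ((lst.drop s).takeWhile (fun x => x != st)).length) := by
  intro fuel
  induction fuel with
  | zero => intro s i _ hmem hf; omega
  | succ f ih =>
    intro s i hidx hmem hf
    have hs : s < lst.length := by
      by_contra h
      rw [List.drop_eq_nil_of_le (by omega)] at hmem
      simp at hmem
    have hget := pvGet_at lst s i hidx hs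
    have hdrop := List.drop_eq_getElem_cons hs
    by_cases hx : lst[s] = st
    · rw [pvFindTerm, hget]
      simp only [hx, ne_eq, not_true_eq_false, if_false]
      conv_rhs => rw [hdrop, List.takeWhile_cons]
      simp [hx]
    · have hmem' : st ∈ lst.drop (s + 1) := by
        rcases List.mem_cons.mp (hdrop ▸ hmem) with h | h
        · exact absurd h.symm hx
        · exact h
      have hs1 : s + 1 < lst.length := by
        by_contra h
        rw [List.drop_eq_nil_of_le (by omega)] at hmem'
        simp at hmem'
      have hidx' : ((0 ≤ i + 1 ∧ i + 1 = ((s+1 : Nat) : Int)) ∨ (i + 1 < 0 ∧ (i + 1) + lst.length = ((s+1 : Nat) : Int))) := by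
        rcases hidx with ⟨hi, heq⟩ | ⟨hi, heq⟩
        · left; constructor <;> [omega; (push_cast; omega)]
        · right; push_cast; omega
      rw [pvFindTerm, hget]
      simp only [ne_eq, hx, not_false_eq_true, if_true]
      rw [ih (s+1) (i+1) hidx' hmem' (by omega)]
      conv_rhs => rw [hdrop, List.takeWhile_cons]
      simp [hx]
      ring_nf

-- Pre_ gives the resolved start position and the terminator beyond it
theorem pvPre_start (lst : List String) (i : Int) (st : String)
    (h : Pre_retrive_from_lst_by_str lst i st) :
    ((0 ≤ i ∧ i = (pvStart lst i : Int)) ∨ (i < 0 ∧ i + lst.length = (pvStart lst i : Int)))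
      ∧ st ∈ lst.drop (pvStart lst i) := by
  rcases h with ⟨hi, hmem⟩ | ⟨hi, hnn, hmem⟩
  · refine ⟨Or.inl ⟨hi, by simp [pvStart, hi]⟩, ?_⟩
    simpa [pvStart, hi] using hmem
  · refine ⟨Or.inr ⟨hi, by simp [pvStart, not_le.mpr hi]; omega⟩, ?_⟩
    simpa [pvStart, not_le.mpr hi] using hmem

-- the scanned run stops strictly before the end of the list
theorem pvParts_lt (lst : List String) (i : Int) (st : String)
    (h : st ∈ lst.drop (pvStart lst i)) :
    (pvParts lst i st).length < lst.length - pvStart lst i := by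
  have hlen : (pvParts lst i st).length ≤ (lst.drop (pvStart lst i)).length :=
    (List.takeWhile_prefix _).length_le
  rw [List.length_drop] at hlen
  rcases eq_or_lt_of_le hlen with heq | hlt
  · exfalso
    have hpre : pvParts lst i st <+: lst.drop (pvStart lst i) := List.takeWhile_prefix _
    have heq2 : pvParts lst i st = lst.drop (pvStart lst i) := by
      apply List.IsPrefix.eq_of_length hpre
      rw [List.length_drop]; exact heq
    have hmem : st ∈ pvParts lst i st := heq2 ▸ h
    have := List.mem_takeWhile_imp hmem
    simp at this
  · exact hlt

-- Python slice lst[i:i+n] inside the scanned region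
theorem pvSlice_eq (lst : List String) (i : Int) (s n : Nat)
    (hidx : (0 ≤ i ∧ i = (s : Int)) ∨ (i < 0 ∧ i + lst.length = (s : Int)))
    (hn : n < lst.length - s) :
    PySem.List.slice lst (some i) (some (i + n)) = (lst.drop s).take n := by
  rcases hidx with ⟨hi, rfl⟩ | ⟨hi, heq⟩
  · rw [PySem.List.slice_natCast_add]
  · have hj : i + n < 0 := by omega
    have h1 : PySem.List.clampIdx lst.length i = s := by
      simp only [PySem.List.clampIdx, if_pos hi]
      split <;> omega
    have h2 : PySem.List.clampIdx lst.length (i + n) = s + n := by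
      simp only [PySem.List.clampIdx, if_pos hj]
      split <;> omega
    simp only [PySem.List.slice, h1, h2]
    congr 1
    omega

-- A's value under Pre_
theorem pvA_val (lst : List String) (i : Int) (st : String)
    (h : Pre_retrive_from_lst_by_str lst i st) :
    retrive_from_lst_by_str lst i st = (pvParts lst i st).foldl pvStep "" := by
  obtain ⟨hidx, hmem⟩ := pvPre_start lst i st h
  exact pvLoopA_eq lst st (lst.length + 1) (pvStart lst i) i "" hidx hmem (by omega)

-- B's value under Pre_
theorem pvB_val (lst : List String) (i : Int) (st : String)
    (h : Pre_retrive_from_lst_by_str lst i st) :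
    retrive_from_lst_by_str_alt lst i st = PySem.Str.join "_" (pvParts lst i st) := by
  obtain ⟨hidx, hmem⟩ := pvPre_start lst i st h
  have hlt := pvParts_lt lst i st hmem
  unfold retrive_from_lst_by_str_alt
  rw [pvFindTerm_eq lst st (lst.length + 1) (pvStart lst i) i hidx hmem (by omega)]
  have hslice := pvSlice_eq lst i (pvStart lst i) (pvParts lst i st).length hidx hlt
  simp only [pvParts] at hslice ⊢
  rw [hslice]
  congr 1
  exact (List.prefix_iff_eq_take.mp (List.takeWhile_prefix _)).symm

-- join "_" (x :: t) spelled out on code points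
theorem pvJoin_toList (x : String) (t : List String) :
    (PySem.Str.join "_" (x :: t)).toList = x.toList ++ t.flatMap (fun y => '_' :: y.toList) := by
  induction t generalizing x with
  | nil => simp [PySem.Str.toList_join, PySem.Chars.join, List.intercalate]
  | cons y t ih =>
    have h2 : (['_'] : List Char).intercalate (y.toList :: t.map String.toList)
        = y.toList ++ t.flatMap (fun z => '_' :: z.toList) := by
      have h := ih y
      rw [PySem.Str.toList_join] at h
      simpa [PySem.Chars.join] using h
    rw [PySem.Str.toList_join]
    simp only [List.map_cons, PySem.Chars.join]
    rw [show ("_" : String).toList = ['_'] from rfl]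
    rw [show (['_'] : List Char).intercalate (x.toList :: y.toList :: t.map String.toList)
        = x.toList ++ ['_'] ++ (['_'] : List Char).intercalate (y.toList :: t.map String.toList) by
      simp [List.intercalate, List.intersperse]]
    rw [h2]
    simp

theorem pvStep_toList (r x : String) (hr : r ≠ "") :
    (pvStep r x).toList = r.toList ++ '_' :: x.toList := by
  simp [pvStep, hr, String.toList_append]

theorem pvStep_ne (r x : String) (hr : r ≠ "") : pvStep r x ≠ "" := by
  intro h
  have h2 := congrArg String.toList h
  rw [pvStep_toList r x hr] at h2
  simp at h2

-- the fold with a nonempty accumulator is the accumulator followed by "_y" blocks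
theorem pvFold_toList (t : List String) : ∀ (r : String), r ≠ "" →
    ((t.foldl pvStep r).toList) = r.toList ++ t.flatMap (fun y => '_' :: y.toList) := by
  induction t with
  | nil => intro r _; simp
  | cons x t ih =>
    intro r hr
    rw [List.foldl_cons, ih (pvStep r x) (pvStep_ne r x hr), pvStep_toList r x hr]
    simp

theorem pvFold_len_le (q : List String) : ∀ (r : String),
    ((q.foldl pvStep r).toList).length ≤ r.toList.length + (q.flatMap (fun y => '_' :: y.toList)).length := by
  induction q with
  | nil => intro r; simp
  | cons x q ih =>
    intro r
    rw [List.foldl_cons]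
    refine le_trans (ih (pvStep r x)) ?_
    have h : (pvStep r x).toList.length ≤ r.toList.length + 1 + x.toList.length := by
      simp only [pvStep]
      split <;> simp [String.toList_append] <;> omega
    simp only [List.flatMap_cons, List.length_append, List.length_cons]
    omega

theorem pvStep_empty (x : String) : pvStep "" x = x := by
  simp [pvStep]

-- within Pre_, D_ says exactly: the scanned run starts with "" and is not just [""]
theorem pvD_char (lst : List String) (i : Int) (st : String)
    (hpre : Pre_retrive_from_lst_by_str lst i st) :
    D_retrive_from_lst_by_str lst i st ↔
      ((pvParts lst i st).head? = some "" ∧ pvParts lst i st ≠ [""]) := by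
  obtain ⟨_, hmem⟩ := pvPre_start lst i st hpre
  rw [D_retrive_from_lst_by_str]
  have hs : pvStart lst i < lst.length := by
    by_contra h
    rw [List.drop_eq_nil_of_le (by omega)] at hmem
    simp at hmem
  have hdrop := List.drop_eq_getElem_cons hs
  have hsplit : pvParts lst i st =
      if lst[pvStart lst i] != st then
        lst[pvStart lst i] :: (lst.drop (pvStart lst i + 1)).takeWhile (fun x => x != st)
      else [] := by
    rw [pvParts, hdrop, List.takeWhile_cons]
  constructor
  · rintro ⟨hst, h0, h1⟩
    rw [List.getElem?_eq_getElem hs, Option.some.injEq] at h0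
    have hxne : (lst[pvStart lst i] != st) = true := by
      rw [bne_iff_ne, h0]
      exact fun h => hst h.symm
    rw [hxne, if_pos rfl] at hsplit
    refine ⟨by rw [hsplit, h0]; rfl, ?_⟩
    rw [hsplit, h0]
    intro hpe
    have htw : (lst.drop (pvStart lst i + 1)).takeWhile (fun x => x != st) = [] := by
      simpa using hpe
    by_cases hs1 : pvStart lst i + 1 < lst.length
    · have hdrop1 := List.drop_eq_getElem_cons hs1
      rw [hdrop1, List.takeWhile_cons] at htw
      by_cases hx1 : lst[pvStart lst i + 1] = st
      · exact h1 (by rw [List.getElem?_eq_getElem hs1, hx1])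
      · simp [hx1] at htw
    · have hnil : lst.drop (pvStart lst i + 1) = [] := List.drop_eq_nil_of_le (by omega)
      rw [hdrop, hnil, h0] at hmem
      simp at hmem
      exact hst hmem
  · rintro ⟨hh, hne⟩
    by_cases hxx : lst[pvStart lst i] = st
    · rw [if_neg (by simp [hxx])] at hsplit
      rw [hsplit] at hh
      simp at hh
    · rw [if_pos (by simpa using hxx)] at hsplit
      rw [hsplit] at hh hne
      simp only [List.head?_cons, Option.some.injEq] at hh
      have hst : st ≠ "" := fun h => hxx (hh ▸ h ▸ rfl)
      refine ⟨hst, by rw [List.getElem?_eq_getElem hs, hh], ?_⟩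
      have htw : (lst.drop (pvStart lst i + 1)).takeWhile (fun x => x != st) ≠ [] := by
        intro h
        exact hne (by rw [h, hh])
      rcases hd1 : lst.drop (pvStart lst i + 1) with _ | ⟨y, ys⟩
      · rw [hd1] at htw; simp at htw
      · have hs1 : pvStart lst i + 1 < lst.length := by
          by_contra h
          rw [List.drop_eq_nil_of_le (by omega)] at hd1
          simp at hd1
        have hy : y = lst[pvStart lst i + 1] := by
          have := List.drop_eq_getElem_cons hs1
          rw [hd1] at this
          exact (List.cons.injEq _ _ _ _ ▸ this).1
        rw [hd1, List.takeWhile_cons] at htw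
        by_cases hyst : y = st
        · rw [if_neg (by simp [hyst])] at htw; simp at htw
        · rw [List.getElem?_eq_getElem hs1, ← hy]
          simp [hyst]

theorem pvUnchanged (lst : List String) (i : Int) (st : String)
    (hpre : Pre_retrive_from_lst_by_str lst i st)
    (hnd : ¬ D_retrive_from_lst_by_str lst i st) :
    retrive_from_lst_by_str lst i st = retrive_from_lst_by_str_alt lst i st := by
  have hnd2 : ¬ ((pvParts lst i st).head? = some "" ∧ pvParts lst i st ≠ [""]) :=
    fun h => hnd ((pvD_char lst i st hpre).mpr h)
  rw [pvA_val lst i st hpre, pvB_val lst i st hpre]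
  rcases hp : pvParts lst i st with _ | ⟨x, t⟩
  · decide
  · by_cases hx : x = ""
    · subst hx
      have ht : t = [] := by
        by_contra ht
        exact hnd2 ⟨by rw [hp]; rfl, by rw [hp]; simp [ht]⟩
      subst ht
      decide
    · apply String.toList_inj.mp
      rw [List.foldl_cons, pvStep_empty, pvFold_toList t x hx, pvJoin_toList]

-- ===== VERDICT (by name: the statement is the Claim_ definition above) =====
theorem retrive_from_lst_by_str_spec : Claim_unchanged_retrive_from_lst_by_str := by
  intro lst i st _ hpre hnd
  exact pvUnchanged lst i st hpre hnd

theorem retrive_from_lst_by_str_changed : Claim_changed_retrive_from_lst_by_str := by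
  unfold Claim_changed_retrive_from_lst_by_str; decide

theorem retrive_from_lst_by_str_tight : Claim_exact_retrive_from_lst_by_str := by
  intro lst i st _ hpre hd heq
  obtain ⟨hh, hne⟩ := (pvD_char lst i st hpre).mp hd
  rw [pvA_val lst i st hpre, pvB_val lst i st hpre] at heq
  rcases hp : pvParts lst i st with _ | ⟨x, t⟩
  · rw [hp] at hh; simp at hh
  · rw [hp] at hh hne heq
    simp only [List.head?_cons, Option.some.injEq] at hh
    subst hh
    have ht : t ≠ [] := fun h => hne (by rw [h])
    rcases t with _ | ⟨y, t'⟩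
    · exact ht rfl
    · have hlenA : ((("" :: y :: t').foldl pvStep "").toList).length
          ≤ y.toList.length + (t'.flatMap (fun z => '_' :: z.toList)).length := by
        rw [List.foldl_cons, pvStep_empty, List.foldl_cons, pvStep_empty]
        simpa using pvFold_len_le t' y
      have hlenB : ((PySem.Str.join "_" ("" :: y :: t')).toList).length
          = 1 + y.toList.length + (t'.flatMap (fun z => '_' :: z.toList)).length := by
        rw [pvJoin_toList]
        simp
        omega
      rw [heq] at hlenA
      omega
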